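-- pv_equiv track=rewrite | github.com/kineticsquid/simple-soe | simple-soe.py | vocalize_matrix
-- ===== SOURCE A (Python) =====
-- def vocalize_matrix(matrix):
--     def handle_empty_rows(successive_empty_rows):
--         if len(successive_empty_rows) == 1:
--             text.append('Row %s. All empty.' % successive_empty_rows[0])
--         elif len(successive_empty_rows) == 2:
--             text.append('Rows %s and %s. All empty.' % (successive_empty_rows[0], successive_empty_rows[1]))
--         elif len(successive_empty_rows) > 2:
--             text.append('Rows %s through %s. All empty.' % (successive_empty_rows[0],
--                                                             successive_empty_rows[len(successive_empty_rows) - 1]))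
--         return
--
--     text = []
--     successive_empty_rows = []
--     row_index = 1
--     for row in matrix:
--         if sum(row) == 0:
--             successive_empty_rows.append(row_index)
--         else:
--             handle_empty_rows(successive_empty_rows)
--             successive_empty_rows = []
--             row_string = 'Row %s. ' % row_index
--             for column_index in range(0, len(row)):
--                 if column_index <= len(row) - 2:
--                     if sum(row[column_index:len(row)]) == 0:
--                         row_string = row_string + 'The rest of the row is empty  '
--                         break
--                 if row[column_index] == 0:
--                     row_string = row_string + 'empty, '
--                 else:
--                     row_string = row_string + str(row[column_index]) + ', '
--             row_string = row_string[0:len(row_string) - 2] + '.'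
--             text.append(row_string)
--         row_index += 1
--     handle_empty_rows(successive_empty_rows)
--     return text
-- ===== SOURCE B (Python) =====
-- def vocalize_matrix(matrix):
--     def summarize(start, end):
--         if start == end:
--             return 'Row %s. All empty.' % start
--         if end == start + 1:
--             return 'Rows %s and %s. All empty.' % (start, end)
--         return 'Rows %s through %s. All empty.' % (start, end)
--
--     def describe(idx, row):
--         n = len(row)
--         suffix = [0] * (n + 1)          # suffix[j] = sum(row[j:]) in O(n)
--         for j in range(n - 1, -1, -1):
--             suffix[j] = suffix[j + 1] + row[j]
--         pieces = []
--         for j in range(n):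
--             if j <= n - 2 and suffix[j] == 0:
--                 pieces.append('The rest of the row is empty')
--                 break
--             pieces.append('empty' if row[j] == 0 else str(row[j]))
--         return 'Row %s. %s.' % (idx, ', '.join(pieces))
--
--     out = []
--     run_start = None                    # start of the current run of empty rows
--     for i, row in enumerate(matrix, 1):
--         if sum(row) == 0:
--             if run_start is None:
--                 run_start = i
--         else:
--             if run_start is not None:
--                 out.append(summarize(run_start, i - 1))
--                 run_start = None
--             out.append(describe(i, row))
--     if run_start is not None:
--         out.append(summarize(run_start, len(matrix)))
--     return out
-- ===== Notes on version B (the rewrite author's own statement) =====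
-- stated objective: faster
-- what changed: B precomputes each row's suffix sums once (O(m)) instead of re-summing row[j:] at every column, builds the row text as a list of pieces joined with ', ' instead of repeated string concatenation plus a trailing-two-character cut, and tracks a run of empty rows by its start index instead of accumulating the whole index list.
import Mathlib
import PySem

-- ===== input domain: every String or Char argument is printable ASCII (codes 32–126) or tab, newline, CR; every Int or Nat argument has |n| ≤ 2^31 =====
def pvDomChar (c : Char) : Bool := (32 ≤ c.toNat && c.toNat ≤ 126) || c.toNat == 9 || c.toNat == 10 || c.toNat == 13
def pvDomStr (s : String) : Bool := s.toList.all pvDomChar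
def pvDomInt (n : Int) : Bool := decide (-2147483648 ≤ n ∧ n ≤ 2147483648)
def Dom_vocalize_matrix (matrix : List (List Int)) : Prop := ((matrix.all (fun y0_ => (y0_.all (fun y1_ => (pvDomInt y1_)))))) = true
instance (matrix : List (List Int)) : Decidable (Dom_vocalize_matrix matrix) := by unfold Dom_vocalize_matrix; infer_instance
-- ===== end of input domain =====

-- B replaces A's repeated O(m) re-summing of row[j:] by per-row suffix sums, joins row pieces with ', '
-- instead of concatenate-then-cut, and tracks empty-row runs by start index: asymptotically faster (O(n*m) vs O(n*m^2)).


-- ===== PORT A =====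
-- Python str values are carried as List Char (PySem's representation) and packed with String.ofList on output.
-- handle_empty_rows: appends the summary line for the accumulated list of empty row indices.
def vmA_handle (text : List String) (ser : List Int) : List String :=
  if ser.length = 1 then
    text ++ [String.ofList ("Row ".toList ++ PySem.Int.toChars (PySem.List.pyGetD ser 0 0) ++ ". All empty.".toList)]
  else if ser.length = 2 then
    text ++ [String.ofList ("Rows ".toList ++ PySem.Int.toChars (PySem.List.pyGetD ser 0 0) ++
      " and ".toList ++ PySem.Int.toChars (PySem.List.pyGetD ser 1 0) ++ ". All empty.".toList)]
  else if 2 < ser.length then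
    text ++ [String.ofList ("Rows ".toList ++ PySem.Int.toChars (PySem.List.pyGetD ser 0 0) ++
      " through ".toList ++ PySem.Int.toChars (PySem.List.pyGetD ser ((ser.length : Int) - 1) 0) ++ ". All empty.".toList)]
  else text

-- the inner 'for column_index in range(0, len(row))' loop with its break
def vmA_cols (row : List Int) (j : Nat) (rs : List Char) : List Char :=
  if _h : j < row.length then
    if j + 2 ≤ row.length ∧ (PySem.List.slice row (some (j : Int)) (some (row.length : Int))).sum = 0 then
      -- 'column_index <= len(row) - 2' is 'j + 2 ≤ len' (both sides Int-exact for j, len ≥ 0)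
      rs ++ "The rest of the row is empty  ".toList
    else
      vmA_cols row (j + 1)
        (rs ++ (if PySem.List.pyGetD row (j : Int) 0 = 0 then "empty, ".toList
                else PySem.Int.toChars (PySem.List.pyGetD row (j : Int) 0) ++ ", ".toList))
  else rs
  termination_by row.length - j

-- one non-empty row: 'Row i. ' prefix, column loop, then row_string[0:len-2] + '.'
-- (row_string always has ≥ 7 characters here, so the Python slice is exactly List.take (len - 2))
def vmA_row (i : Int) (row : List Int) : String :=
  let rs := vmA_cols row 0 ("Row ".toList ++ PySem.Int.toChars i ++ ". ".toList)
  String.ofList (rs.take (rs.length - 2) ++ ['.'])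

def vmA_loop : List (List Int) → List String → List Int → Int → List String
  | [], text, ser, _ => vmA_handle text ser
  | row :: rest, text, ser, i =>
    if row.sum = 0 then vmA_loop rest text (ser ++ [i]) (i + 1)
    else vmA_loop rest (vmA_handle text ser ++ [vmA_row i row]) [] (i + 1)

def vocalize_matrix (matrix : List (List Int)) : List String :=
  vmA_loop matrix [] [] 1

-- ===== PORT B =====
def vmB_sum (s e : Int) : String :=
  if s = e then String.ofList ("Row ".toList ++ PySem.Int.toChars s ++ ". All empty.".toList)
  else if e = s + 1 then
    String.ofList ("Rows ".toList ++ PySem.Int.toChars s ++ " and ".toList ++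
      PySem.Int.toChars e ++ ". All empty.".toList)
  else
    String.ofList ("Rows ".toList ++ PySem.Int.toChars s ++ " through ".toList ++
      PySem.Int.toChars e ++ ". All empty.".toList)

-- suffix sums built right-to-left: suffix[j] = suffix[j+1] + row[j], suffix[n] = 0
def vmB_suffix : List Int → List Int
  | [] => [0]
  | x :: xs => (x + (vmB_suffix xs).headD 0) :: vmB_suffix xs

def vmB_pieces (row suffix : List Int) (j : Nat) : List (List Char) :=
  if _h : j < row.length then
    if j + 2 ≤ row.length ∧ PySem.List.pyGetD suffix (j : Int) 0 = 0 then
      ["The rest of the row is empty".toList]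
    else
      (if PySem.List.pyGetD row (j : Int) 0 = 0 then "empty".toList
       else PySem.Int.toChars (PySem.List.pyGetD row (j : Int) 0)) :: vmB_pieces row suffix (j + 1)
  else []
  termination_by row.length - j

def vmB_row (i : Int) (row : List Int) : String :=
  String.ofList ("Row ".toList ++ PySem.Int.toChars i ++ ". ".toList ++
    PySem.Chars.join ", ".toList (vmB_pieces row (vmB_suffix row) 0) ++ ".".toList)

def vmB_loop (total : Int) : List (List Int) → Int → List String → Option Int → List String
  | [], _, out, none => out
  | [], _, out, some s => out ++ [vmB_sum s total]
  | row :: rest, i, out, run =>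
    if row.sum = 0 then
      vmB_loop total rest (i + 1) out (match run with | none => some i | some s => some s)
    else
      vmB_loop total rest (i + 1)
        ((match run with | none => out | some s => out ++ [vmB_sum s (i - 1)]) ++ [vmB_row i row]) none

def vocalize_matrix_alt (matrix : List (List Int)) : List String :=
  vmB_loop (matrix.length : Int) matrix 1 [] none

-- ===== PRECONDITION & SPEC =====
def Spec_vocalize_matrix (matrix : List (List Int)) (out : List String) : Prop := out = vocalize_matrix_alt matrix
instance (matrix : List (List Int)) (out : List String) : Decidable (Spec_vocalize_matrix matrix out) := by unfold Spec_vocalize_matrix; infer_instance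

-- ===== CLAIM (what is proved, stated in full; the proofs are below) =====
def Claim_equal_vocalize_matrix : Prop := ∀ (matrix : List (List Int)), Dom_vocalize_matrix matrix → Spec_vocalize_matrix matrix (vocalize_matrix matrix)

-- ===== LEMMAS AND PROOFS =====

-- one-step unfoldings of the two column loops
lemma vmA_cols_lt (row : List Int) (j : Nat) (rs : List Char) (hj : j < row.length) :
    vmA_cols row j rs =
      if j + 2 ≤ row.length ∧ (PySem.List.slice row (some (j : Int)) (some (row.length : Int))).sum = 0 then
        rs ++ "The rest of the row is empty  ".toList
      else
        vmA_cols row (j + 1)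
          (rs ++ (if PySem.List.pyGetD row (j : Int) 0 = 0 then "empty, ".toList
                  else PySem.Int.toChars (PySem.List.pyGetD row (j : Int) 0) ++ ", ".toList)) := by
  rw [vmA_cols]; simp [hj]

lemma vmA_cols_ge (row : List Int) (j : Nat) (rs : List Char) (hj : ¬ j < row.length) :
    vmA_cols row j rs = rs := by
  rw [vmA_cols]; simp [hj]

lemma vmB_pieces_lt (row suffix : List Int) (j : Nat) (hj : j < row.length) :
    vmB_pieces row suffix j =
      if j + 2 ≤ row.length ∧ PySem.List.pyGetD suffix (j : Int) 0 = 0 then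
        ["The rest of the row is empty".toList]
      else
        (if PySem.List.pyGetD row (j : Int) 0 = 0 then "empty".toList
         else PySem.Int.toChars (PySem.List.pyGetD row (j : Int) 0)) :: vmB_pieces row suffix (j + 1) := by
  rw [vmB_pieces]; simp [hj]

lemma vmB_pieces_ge (row suffix : List Int) (j : Nat) (hj : ¬ j < row.length) :
    vmB_pieces row suffix j = [] := by
  rw [vmB_pieces]; simp [hj]

-- the suffix-sum array really holds the tail sums
lemma vmB_suffix_getD (row : List Int) : ∀ j : Nat, (vmB_suffix row).getD j 0 = (row.drop j).sum := by
  induction row with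
  | nil => intro j; cases j <;> simp [vmB_suffix]
  | cons x xs ih =>
    intro j
    have h0 : (vmB_suffix xs).headD 0 = xs.sum := by
      have h := ih 0
      cases hxs : vmB_suffix xs with
      | nil => rw [hxs] at h; simpa using h
      | cons a l => rw [hxs] at h; simpa using h
    cases j with
    | zero => simp only [vmB_suffix, List.getD_cons_zero, List.drop_zero, List.sum_cons, h0]
    | succ k => simp only [vmB_suffix, List.getD_cons_succ, List.drop_succ_cons]; exact ih k

-- the A-side column loop only appends to its accumulator
lemma vmA_cols_acc (row : List Int) :
    ∀ k j rs, row.length - j ≤ k → vmA_cols row j rs = rs ++ vmA_cols row j [] := by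
  intro k
  induction k with
  | zero =>
    intro j rs h
    have hj : ¬ j < row.length := by omega
    rw [vmA_cols_ge row j rs hj, vmA_cols_ge row j [] hj, List.append_nil]
  | succ k ih =>
    intro j rs h
    by_cases hj : j < row.length
    · rw [vmA_cols_lt row j rs hj, vmA_cols_lt row j [] hj]
      split_ifs
      · simp
      · rw [ih (j + 1) _ (by omega)]
        conv_rhs => rw [ih (j + 1) _ (by omega)]
        simp
      · rw [ih (j + 1) _ (by omega)]
        conv_rhs => rw [ih (j + 1) _ (by omega)]
        simp
    · rw [vmA_cols_ge row j rs hj, vmA_cols_ge row j [] hj, List.append_nil]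

-- A's column loop output = B's pieces joined with ', ', plus a final 2-character separator
lemma vmA_cols_eq (row : List Int) :
    ∀ k j, row.length - j ≤ k →
    (vmB_pieces row (vmB_suffix row) j = [] ∧ vmA_cols row j [] = []) ∨
    (vmB_pieces row (vmB_suffix row) j ≠ [] ∧ ∃ t : List Char,
      (t = ", ".toList ∨ t = "  ".toList) ∧
      vmA_cols row j [] = PySem.Chars.join ", ".toList (vmB_pieces row (vmB_suffix row) j) ++ t) := by
  intro k
  induction k with
  | zero =>
    intro j h
    have hj : ¬ j < row.length := by omega
    left
    exact ⟨vmB_pieces_ge row _ j hj, vmA_cols_ge row j [] hj⟩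
  | succ k ih =>
    intro j h
    by_cases hj : j < row.length
    · -- align the two break conditions
      have hcond : PySem.List.pyGetD (vmB_suffix row) (j : Int) 0 =
          (PySem.List.slice row (some (j : Int)) (some (row.length : Int))).sum := by
        rw [PySem.List.pyGetD_natCast, vmB_suffix_getD, PySem.List.slice_natCast]
        have ht : (List.drop j row).take (row.length - j) = List.drop j row := by
          apply List.take_of_length_le; simp
        rw [ht]
      rw [vmA_cols_lt row j [] hj, vmB_pieces_lt row _ j hj, hcond]
      by_cases hbrk : j + 2 ≤ row.length ∧
          (PySem.List.slice row (some (j : Int)) (some (row.length : Int))).sum = 0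
      · right
        rw [if_pos hbrk, if_pos hbrk]
        refine ⟨by simp, "  ".toList, Or.inr rfl, ?_⟩
        rw [PySem.Chars.join_singleton]
        decide
      · rw [if_neg hbrk, if_neg hbrk]
        right
        set p : List Char := (if PySem.List.pyGetD row (j : Int) 0 = 0 then "empty".toList
          else PySem.Int.toChars (PySem.List.pyGetD row (j : Int) 0)) with hp
        have hApp : ([] : List Char) ++ (if PySem.List.pyGetD row (j : Int) 0 = 0 then "empty, ".toList
            else PySem.Int.toChars (PySem.List.pyGetD row (j : Int) 0) ++ ", ".toList) = p ++ ", ".toList := by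
          rw [hp]
          split_ifs
          · decide
          · simp
        rw [vmA_cols_acc row k (j + 1) _ (by omega), hApp]
        rcases ih (j + 1) (by omega) with ⟨hnil, hcols⟩ | ⟨hne, t, ht, hcols⟩
        · rw [hnil, hcols, PySem.Chars.join_singleton]
          exact ⟨by simp, ", ".toList, Or.inl rfl, by simp⟩
        · rw [hcols]
          refine ⟨by simp, t, ht, ?_⟩
          cases hq : vmB_pieces row (vmB_suffix row) (j + 1) with
          | nil => exact absurd hq hne
          | cons q qs =>
            rw [PySem.Chars.join_cons_cons]
            simp
    · left
      exact ⟨vmB_pieces_ge row _ j hj, vmA_cols_ge row j [] hj⟩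

-- the per-row strings agree on every non-empty row
lemma vmRow_eq (i : Int) (row : List Int) (hs : row.sum ≠ 0) : vmA_row i row = vmB_row i row := by
  have hrow : row ≠ [] := by intro h; rw [h] at hs; simp at hs
  have hn : 0 < row.length := List.length_pos_iff.mpr hrow
  rcases vmA_cols_eq row row.length 0 (by omega) with ⟨hnil, _⟩ | ⟨_, t, ht, hcols⟩
  · exfalso
    rw [vmB_pieces_lt row _ 0 hn] at hnil
    split_ifs at hnil
  · unfold vmA_row vmB_row
    rw [vmA_cols_acc row row.length 0 _ (by omega), hcols]
    have ht2 : t.length = 2 := by rcases ht with h | h <;> rw [h] <;> decide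
    set l : List Char := ("Row ".toList ++ PySem.Int.toChars i ++ ". ".toList) ++
      (PySem.Chars.join ", ".toList (vmB_pieces row (vmB_suffix row) 0)) with hl
    have hassoc : ("Row ".toList ++ PySem.Int.toChars i ++ ". ".toList) ++
        (PySem.Chars.join ", ".toList (vmB_pieces row (vmB_suffix row) 0) ++ t) = l ++ t := by
      rw [hl]; simp
    rw [hassoc]
    show String.ofList (List.take ((l ++ t).length - 2) (l ++ t) ++ ['.']) = _
    have htake : (l ++ t).take ((l ++ t).length - 2) = l := by
      have hlen : (l ++ t).length - 2 = l.length := by simp [ht2]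
      rw [hlen, List.take_left]
    rw [htake, hl]
    simp

-- the run summary agrees with A's handle_empty_rows on a consecutive index range
lemma vmHandle_eq (text : List String) (s e : Int) (h : s ≤ e) :
    vmA_handle text (PySem.List.pyRange s (e + 1) 1) = text ++ [vmB_sum s e] := by
  have hlen : (PySem.List.pyRange s (e + 1) 1).length = (e + 1 - s).toNat := PySem.List.length_pyRange_one s (e + 1)
  have hget0 : PySem.List.pyGetD (PySem.List.pyRange s (e + 1) 1) 0 0 = s := by
    rw [PySem.List.pyRange_one_cons (by omega)]
    simp [PySem.List.pyGetD_zero_cons]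
  unfold vmA_handle vmB_sum
  rcases lt_trichotomy e (s + 1) with h1 | h1 | h1
  · -- e = s
    have hes : e = s := by omega
    subst hes
    have hl1 : (PySem.List.pyRange e (e + 1) 1).length = 1 := by omega
    simp
  · -- e = s + 1
    subst h1
    have hl2 : (PySem.List.pyRange s (s + 1 + 1) 1).length = 2 := by omega
    have hget1 : PySem.List.pyGetD (PySem.List.pyRange s (s + 1 + 1) 1) 1 0 = s + 1 := by
      rw [PySem.List.pyRange_one_cons (by omega), PySem.List.pyRange_one_cons (by omega),
        PySem.List.pyRange_one_eq_nil (by omega)]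
      simp [PySem.List.pyGetD]
    simp [hl2, hget0, hget1]
  · -- e ≥ s + 2
    have hl3 : 2 < (PySem.List.pyRange s (e + 1) 1).length := by omega
    have hgetL : PySem.List.pyGetD (PySem.List.pyRange s (e + 1) 1)
        (((PySem.List.pyRange s (e + 1) 1).length : Int) - 1) 0 = e := by
      rw [PySem.List.pyGetD_eq_getElem _ _ (by omega) (by omega), PySem.List.getElem_pyRange_one]
      omega
    have hne1 : (PySem.List.pyRange s (e + 1) 1).length ≠ 1 := by omega
    have hne2 : (PySem.List.pyRange s (e + 1) 1).length ≠ 2 := by omega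
    have hse : ¬ s = e := by omega
    have hse1 : ¬ e = s + 1 := by omega
    rw [if_neg hne1, if_neg hne2, if_pos hl3, if_neg hse, if_neg hse1, hget0, hgetL]

-- main loop invariant: A's index list is exactly the range run_start..i-1 tracked by B
lemma vmLoop_eq : ∀ (rest : List (List Int)) (i : Int) (text : List String) (run : Option Int),
    (∀ s, run = some s → s ≤ i - 1) →
    vmA_loop rest text (match run with | none => [] | some s => PySem.List.pyRange s i 1) i
      = vmB_loop (i - 1 + (rest.length : Int)) rest i text run := by
  intro rest
  induction rest with
  | nil =>
    intro i text run hrun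
    cases run with
    | none => simp [vmA_loop, vmB_loop, vmA_handle]
    | some s =>
      have hs : s ≤ i - 1 := hrun s rfl
      have hi : i = (i - 1) + 1 := by ring
      simp only [vmA_loop, vmB_loop, List.length_nil, Int.natCast_zero, add_zero]
      rw [hi, vmHandle_eq text s (i - 1) hs]
      norm_num
  | cons row rest ih =>
    intro i text run hrun
    by_cases hz : row.sum = 0
    · have hstep := ih (i + 1) text
        (some (match run with | none => i | some s => s))
        (by intro s hs
            cases run with
            | none => simp at hs; omega
            | some s' => simp at hs; have := hrun s' rfl; omega)
      cases run with
      | none =>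
        simp only [vmA_loop, vmB_loop, hz, if_pos]
        have hser : ([] : List Int) ++ [i] = PySem.List.pyRange i (i + 1) 1 := by
          rw [PySem.List.pyRange_one_singleton]; simp
        rw [hser]
        have htot : (i + 1) - 1 + ((rest.length : Nat) : Int) = i - 1 + (((row :: rest).length : Nat) : Int) := by
          simp only [List.length_cons]; push_cast; ring
        rw [← htot]
        exact hstep
      | some s =>
        have hs : s ≤ i - 1 := hrun s rfl
        simp only [vmA_loop, vmB_loop, hz, if_pos]
        have hser : PySem.List.pyRange s i 1 ++ [i] = PySem.List.pyRange s (i + 1) 1 :=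
          (PySem.List.pyRange_one_succ_right (by omega)).symm
        rw [hser]
        have htot : (i + 1) - 1 + ((rest.length : Nat) : Int) = i - 1 + (((row :: rest).length : Nat) : Int) := by
          simp only [List.length_cons]; push_cast; ring
        rw [← htot]
        exact hstep
    · have hrow := vmRow_eq i row hz
      have hstep := ih (i + 1)
        ((match run with | none => text | some s => text ++ [vmB_sum s (i - 1)]) ++ [vmB_row i row])
        none (by intro s hs; simp at hs)
      cases run with
      | none =>
        simp only [vmA_loop, vmB_loop, hz, if_neg, not_false_eq_true]
        have hh : vmA_handle text [] = text := by simp [vmA_handle]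
        rw [hh, hrow]
        have htot : (i + 1) - 1 + ((rest.length : Nat) : Int) = i - 1 + (((row :: rest).length : Nat) : Int) := by
          simp only [List.length_cons]; push_cast; ring
        rw [← htot]
        exact hstep
      | some s =>
        have hs : s ≤ i - 1 := hrun s rfl
        simp only [vmA_loop, vmB_loop, hz, if_neg, not_false_eq_true]
        have hi : i = (i - 1) + 1 := by ring
        rw [hi, vmHandle_eq text s (i - 1) hs, ← hi, hrow]
        have htot : (i + 1) - 1 + ((rest.length : Nat) : Int) = i - 1 + (((row :: rest).length : Nat) : Int) := by
          simp only [List.length_cons]; push_cast; ring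
        rw [← htot]
        exact hstep

-- ===== VERDICT (by name: the statement is the Claim_ definition above) =====
theorem vocalize_matrix_spec : Claim_equal_vocalize_matrix := by
  intro matrix _
  unfold Spec_vocalize_matrix vocalize_matrix vocalize_matrix_alt
  have h := vmLoop_eq matrix 1 [] none (by intro s hs; simp at hs)
  simp only at h
  rw [h]
  norm_num
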